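-- pv_equiv track=rewrite | github.com/cola0405/Algo-DS | permutation.py | dfs
-- ===== SOURCE A (Python) =====
-- def dfs(lst, pre, res, k):
--     if k == 0:
--         tmp = []
--         for inx in range(len(pre)):
--             tmp.append(pre[inx])
--         res.append(tmp)
--     for i in range(len(lst)):
--         if i not in pre:
--             pre.append(i)
--             dfs(lst, pre, res, k-1)
--             pre.pop()
--     return res
-- ===== SOURCE B (Python) =====
-- import itertools
--
-- def dfs(lst, pre, res, k):
--     if k < 0:
--         return res
--     available = [i for i in range(len(lst)) if i not in pre]
--     if k <= len(available):
--         for perm in itertools.permutations(available, k):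
--             res.append(list(pre) + list(perm))
--     return res
-- ===== Notes on version B (the rewrite author's own statement) =====
-- stated objective: idiomatic
-- what changed: Replaces the backtracking recursion over a mutated prefix with a single itertools.permutations call over the precomputed list of available indices (which yields the same lexicographic order), appending pre+perm for each.
import Mathlib
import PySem

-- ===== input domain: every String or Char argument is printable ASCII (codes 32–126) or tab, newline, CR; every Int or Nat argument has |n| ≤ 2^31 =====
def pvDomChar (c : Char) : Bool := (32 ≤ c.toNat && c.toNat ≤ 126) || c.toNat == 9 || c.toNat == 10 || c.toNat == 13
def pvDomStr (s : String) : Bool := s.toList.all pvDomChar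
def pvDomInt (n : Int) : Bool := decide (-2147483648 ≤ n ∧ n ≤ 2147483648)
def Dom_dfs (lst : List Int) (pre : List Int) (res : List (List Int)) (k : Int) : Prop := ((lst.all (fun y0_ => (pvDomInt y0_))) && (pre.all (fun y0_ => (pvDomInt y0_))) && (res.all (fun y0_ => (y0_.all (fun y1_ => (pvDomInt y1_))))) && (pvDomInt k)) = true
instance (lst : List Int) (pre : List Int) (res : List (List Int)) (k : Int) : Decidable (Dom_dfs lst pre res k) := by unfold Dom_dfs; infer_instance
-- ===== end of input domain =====

-- B replaces A's backtracking recursion by one enumeration of k-permutations of the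
-- available indices (idiomatic, via itertools.permutations); return-value equivalence is
-- proved — both Pythons also append the produced rows to `res` in place, identically.


-- ===== PORT A =====
-- the available indices of lst (those i in range(len(lst)) with i not in pre);
-- used only to size the totality fuel of the recursion (Python's recursion stops
-- exactly when no index remains available)
def dfsAvail (lst : List Int) (pre : List Int) : List Int :=
  (PySem.List.pyRange 0 (lst.length : Int) 1).filter (fun i => decide (i ∉ pre))

-- literal body of A; `fuel` only makes the recursion total (any fuel > number of
-- available indices gives Python's value)
def dfsAux (lst : List Int) (pre : List Int) (res : List (List Int)) (k : Int) :
    Nat → List (List Int)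
  | 0 => res
  | fuel + 1 =>
    let res1 :=
      if k = 0 then
        res ++ [(PySem.List.pyRange 0 (pre.length : Int) 1).foldl
          (fun tmp inx => tmp ++ [PySem.List.pyGetD pre inx 0]) []]
      else res
    (PySem.List.pyRange 0 (lst.length : Int) 1).foldl
      (fun r i => if i ∈ pre then r else dfsAux lst (pre ++ [i]) r (k - 1) fuel) res1

def dfs (lst : List Int) (pre : List Int) (res : List (List Int)) (k : Int) : List (List Int) :=
  dfsAux lst pre res k ((dfsAvail lst pre).length + 1)

-- ===== PORT B =====
-- port of itertools.permutations(avail, k): all k-permutations in the order itertools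
-- yields them (lexicographic in positions of avail); empty when k > len(avail)
def dfsPerms (avail : List Int) : Nat → List (List Int)
  | 0 => [[]]
  | m + 1 =>
    if avail.length < m + 1 then []
    else avail.flatMap (fun x => (dfsPerms (avail.erase x) m).map (fun p => x :: p))

def dfs_alt (lst : List Int) (pre : List Int) (res : List (List Int)) (k : Int) : List (List Int) :=
  if k < 0 then res
  else
    let available := (PySem.List.pyRange 0 (lst.length : Int) 1).filter (fun i => decide (i ∉ pre))
    if k ≤ (available.length : Int) then
      res ++ (dfsPerms available k.toNat).map (fun p => pre ++ p)
    else res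

-- ===== PRECONDITION & SPEC =====
def Spec_dfs (lst : List Int) (pre : List Int) (res : List (List Int)) (k : Int) (out : List (List Int)) : Prop := out = dfs_alt lst pre res k
instance (lst : List Int) (pre : List Int) (res : List (List Int)) (k : Int) (out : List (List Int)) : Decidable (Spec_dfs lst pre res k out) := by unfold Spec_dfs; infer_instance

-- ===== CLAIM (what is proved, stated in full; the proofs are below) =====
def Claim_equal_dfs : Prop := ∀ (lst : List Int) (pre : List Int) (res : List (List Int)) (k : Int), Dom_dfs lst pre res k → Spec_dfs lst pre res k (dfs lst pre res k)

-- ===== LEMMAS AND PROOFS =====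

theorem foldl_id {A B : Type} (l : List A) (init : B) :
    l.foldl (fun acc _ => acc) init = init := by
  induction l generalizing init with
  | nil => rfl
  | cons a l ih => simp [List.foldl, ih]

theorem dfsAvail_append (lst : List Int) (pre : List Int) (i : Int)
    (hi : i ∈ dfsAvail lst pre) :
    dfsAvail lst (pre ++ [i]) = (dfsAvail lst pre).erase i := by
  have hnd : (dfsAvail lst pre).Nodup :=
    (PySem.List.nodup_pyRange_one 0 (lst.length : Int)).filter _
  rw [hnd.erase_eq_filter i]
  unfold dfsAvail
  rw [List.filter_filter]
  apply List.filter_congr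
  intro j hj
  by_cases h1 : j ∈ pre <;> by_cases h2 : j = i <;> simp [h1, h2]

theorem dfsAux_neg (fuel : Nat) (lst : List Int) (pre : List Int) (res : List (List Int))
    (k : Int) (hk : k < 0) (hfuel : (dfsAvail lst pre).length < fuel) :
    dfsAux lst pre res k fuel = res := by
  induction fuel generalizing pre res k with
  | zero => omega
  | succ fuel ih =>
    unfold dfsAux
    rw [if_neg (by omega)]
    rw [PySem.List.foldl_congr_mem _ _ (fun r _ => r) res ?_]
    · exact foldl_id _ res
    · intro r i hi
      by_cases hmem : i ∈ pre
      · simp [hmem]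
      · beta_reduce
        rw [if_neg hmem]
        have hiav : i ∈ dfsAvail lst pre := by
          unfold dfsAvail; rw [List.mem_filter]; exact ⟨hi, by simpa using hmem⟩
        have hpos : 0 < (dfsAvail lst pre).length := List.length_pos_of_mem hiav
        have hlen : ((dfsAvail lst pre).erase i).length = (dfsAvail lst pre).length - 1 :=
          List.length_erase_of_mem hiav
        exact ih (pre ++ [i]) r (k - 1) (by omega)
          (by rw [dfsAvail_append lst pre i hiav]; omega)

theorem dfsPerms_nil_of_lt (l : List Int) (m : Nat) (h : l.length < m) :
    dfsPerms l m = [] := by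
  cases m with
  | zero => omega
  | succ m => simp only [dfsPerms]; rw [if_pos (by omega)]

theorem dfsPerms_succ (avail : List Int) (m : Nat) :
    dfsPerms avail (m + 1)
      = avail.flatMap (fun x => (dfsPerms (avail.erase x) m).map (fun p => x :: p)) := by
  rw [show dfsPerms avail (m + 1)
      = (if avail.length < m + 1 then []
         else avail.flatMap (fun x => (dfsPerms (avail.erase x) m).map (fun p => x :: p)))
    from rfl]
  split
  · rename_i hlen
    symm
    rw [List.flatMap_eq_nil_iff]
    intro x hx
    have hpos : 1 ≤ avail.length := List.length_pos_of_mem hx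
    have hle : (avail.erase x).length = avail.length - 1 := avail.length_erase_of_mem hx
    rw [dfsPerms_nil_of_lt _ m (by omega), List.map_nil]
  · rfl

theorem dfsAux_spec (fuel : Nat) (lst : List Int) (pre : List Int) (res : List (List Int))
    (k : Int) (hk : 0 ≤ k) (hfuel : (dfsAvail lst pre).length < fuel) :
    dfsAux lst pre res k fuel
      = res ++ (dfsPerms (dfsAvail lst pre) k.toNat).map (fun p => pre ++ p) := by
  induction fuel generalizing pre res k with
  | zero => omega
  | succ fuel ih =>
    unfold dfsAux
    by_cases hk0 : k = 0
    · subst hk0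
      rw [PySem.List.foldl_pyRange_zero_pyGetD' pre 0 (fun tmp x => tmp ++ [x]) []]
      rw [PySem.List.foldl_append_singleton_eq_self]
      rw [PySem.List.foldl_congr_mem _ _ (fun r _ => r) _ ?_]
      · rw [foldl_id]
        simp [dfsPerms]
      · intro r i hi
        by_cases hmem : i ∈ pre
        · simp [hmem]
        · beta_reduce
          rw [if_neg hmem]
          have hiav : i ∈ dfsAvail lst pre := by
            unfold dfsAvail; rw [List.mem_filter]; exact ⟨hi, by simpa using hmem⟩
          have hpos : 0 < (dfsAvail lst pre).length := List.length_pos_of_mem hiav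
          have hlen : ((dfsAvail lst pre).erase i).length = (dfsAvail lst pre).length - 1 :=
            List.length_erase_of_mem hiav
          exact dfsAux_neg fuel lst (pre ++ [i]) r (0 - 1) (by omega)
            (by rw [dfsAvail_append lst pre i hiav]; omega)
    · rw [if_neg hk0]
      rw [PySem.List.foldl_congr_mem _ _
        (fun r i => if i ∈ pre then r
          else r ++ (dfsPerms ((dfsAvail lst pre).erase i) (k - 1).toNat).map
            (fun p => (pre ++ [i]) ++ p)) res ?_]
      · -- collapse the if over the range into a fold over the filtered (available) list
        have hsplit :
            (PySem.List.pyRange 0 (lst.length : Int) 1).foldl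
              (fun r i => if i ∈ pre then r
                else r ++ (dfsPerms ((dfsAvail lst pre).erase i) (k - 1).toNat).map
                  (fun p => (pre ++ [i]) ++ p)) res
            = (dfsAvail lst pre).foldl
              (fun r i => r ++ (dfsPerms ((dfsAvail lst pre).erase i) (k - 1).toNat).map
                  (fun p => (pre ++ [i]) ++ p)) res := by
          unfold dfsAvail
          rw [List.foldl_filter]
          apply PySem.List.foldl_congr_mem
          intro r i _
          by_cases hmem : i ∈ pre <;> simp [hmem]
        rw [hsplit, PySem.List.foldl_append_eq_flatMap]
        have hkt : k.toNat = (k - 1).toNat + 1 := by omega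
        rw [hkt, dfsPerms_succ]
        rw [List.map_flatMap]
        congr 1
        apply List.flatMap_congr  -- pointwise equality of the per-index blocks
        intro x hx
        rw [List.map_map]
        apply List.map_congr_left
        intro p _
        simp
      · intro r i hi
        by_cases hmem : i ∈ pre
        · simp [hmem]
        · beta_reduce
          rw [if_neg hmem, if_neg hmem]
          have hiav : i ∈ dfsAvail lst pre := by
            unfold dfsAvail; rw [List.mem_filter]; exact ⟨hi, by simpa using hmem⟩
          have hpos : 0 < (dfsAvail lst pre).length := List.length_pos_of_mem hiav
          have hlen : ((dfsAvail lst pre).erase i).length = (dfsAvail lst pre).length - 1 :=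
            List.length_erase_of_mem hiav
          rw [ih (pre ++ [i]) r (k - 1) (by omega)
            (by rw [dfsAvail_append lst pre i hiav]; omega)]
          rw [dfsAvail_append lst pre i hiav]

-- ===== VERDICT (by name: the statement is the Claim_ definition above) =====
theorem dfs_spec : Claim_equal_dfs := by
  intro lst pre res k _
  unfold Spec_dfs dfs dfs_alt
  by_cases hk : k < 0
  · rw [if_pos hk]
    exact dfsAux_neg _ lst pre res k hk (by omega)
  · rw [if_neg hk]
    rw [dfsAux_spec _ lst pre res k (by omega) (by omega)]
    have hfold : (PySem.List.pyRange 0 (lst.length : Int) 1).filter (fun i => decide (i ∉ pre))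
        = dfsAvail lst pre := rfl
    rw [hfold]
    by_cases hle : k ≤ ((dfsAvail lst pre).length : Int)
    · rw [if_pos hle]
    · rw [if_neg hle]
      rw [dfsPerms_nil_of_lt _ _ (by omega), List.map_nil, List.append_nil]
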